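-- pv_equiv track=rewrite | github.com/Ladrog/Regular-expressions | formatting.py | group_fio
-- ===== SOURCE A (Python) =====
-- def group_fio(contacts: list):
--     grouped_data = {}
--     for item in contacts[1:]:
--         key = (item[0], item[1])
--         if key not in grouped_data:
--             grouped_data[key] = item[2:]
--         # else:
--         #     for el in item[2:]:
--         #         if el not in grouped_data[key]:
--         #             grouped_data[key].append(el)
--     contact_list = [list(key) + value for key, value in grouped_data.items()]
--     contact_list.insert(0, contacts[0])
--     return contact_list
-- ===== SOURCE B (Python) =====
-- def group_fio(contacts: list):
--     result = [contacts[0]]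
--     seen = set()
--     for item in contacts[1:]:
--         key = (item[0], item[1])
--         if key not in seen:
--             seen.add(key)
--             result.append(list(item))
--     return result
-- ===== Notes on version B (the rewrite author's own statement) =====
-- stated objective: simpler
-- what changed: B builds the output in one pass with a seen-set, appending the item itself at its first occurrence, instead of A's value-dict keyed by (item[0],item[1]) followed by a second pass over items() that reassembles each row as list(key)+value.
import Mathlib
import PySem

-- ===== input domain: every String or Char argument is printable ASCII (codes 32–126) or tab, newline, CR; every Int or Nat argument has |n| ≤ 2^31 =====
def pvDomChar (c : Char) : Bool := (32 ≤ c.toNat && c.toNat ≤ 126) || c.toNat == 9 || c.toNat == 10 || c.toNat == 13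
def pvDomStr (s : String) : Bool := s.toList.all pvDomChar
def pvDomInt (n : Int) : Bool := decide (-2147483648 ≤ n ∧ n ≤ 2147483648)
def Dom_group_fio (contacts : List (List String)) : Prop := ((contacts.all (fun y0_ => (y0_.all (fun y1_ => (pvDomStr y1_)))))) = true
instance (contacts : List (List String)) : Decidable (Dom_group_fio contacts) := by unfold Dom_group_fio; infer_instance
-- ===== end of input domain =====

-- B replaces A's dict-of-values plus a second items() pass by a single pass with a
-- seen-set that appends each first-occurrence row directly (objective: simpler).

-- ===== PORT A =====
-- one loop iteration: grouped_data[key] = item[2:] on first occurrence of (item[0], item[1])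
def fioStepA (d : PySem.Dict (String × String) (List String)) (item : List String) :
    PySem.Dict (String × String) (List String) :=
  match item with
  | a :: b :: rest => if d.contains (a, b) then d else d.insert (a, b) rest
  | _ => d  -- item[0]/item[1] would raise IndexError; unreachable under Pre_

-- list(key) + value
def fioRow (kv : (String × String) × List String) : List String :=
  kv.1.1 :: kv.1.2 :: kv.2

def group_fio (contacts : List (List String)) : List (List String) :=
  let grouped := (PySem.List.slice contacts (some 1) none).foldl fioStepA PySem.Dict.empty
  let contact_list := grouped.items.map fioRow
  match PySem.List.pyGet? contacts 0 with   -- contacts[0]; none = IndexError, excluded by Pre_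
  | some h => h :: contact_list             -- contact_list.insert(0, contacts[0])
  | none => contact_list

-- ===== PORT B =====
-- one loop iteration of B: append item at the first occurrence of its key
def fioStepB (st : List (List String) × PySem.Set (String × String)) (item : List String) :
    List (List String) × PySem.Set (String × String) :=
  match item with
  | a :: b :: _ =>
    if st.2.contains (a, b) then st else (st.1 ++ [item], st.2.add (a, b))
  | _ => st  -- item[0]/item[1] would raise IndexError; unreachable under Pre_

def group_fio_alt (contacts : List (List String)) : List (List String) :=
  match PySem.List.pyGet? contacts 0 with   -- contacts[0]; none = IndexError, excluded by Pre_
  | some h =>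
    ((PySem.List.slice contacts (some 1) none).foldl fioStepB ([h], PySem.Set.empty)).1
  | none => []

-- ===== PRECONDITION & SPEC =====
-- Pre_ excludes exactly the inputs where the Python raises IndexError: the empty list
-- (contacts[0]) and any tail item with fewer than two fields (item[0]/item[1]).
def Pre_group_fio (contacts : List (List String)) : Prop :=
  contacts ≠ [] ∧ ∀ item ∈ contacts.tail, 2 ≤ item.length
instance (contacts : List (List String)) : Decidable (Pre_group_fio contacts) := by
  unfold Pre_group_fio; infer_instance

def pvWitness_group_fio : List (List String) :=
  [["name", "surname", "phone"], ["Ada", "Lovelace", "1"], ["Ada", "Lovelace", "2"]]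

def Spec_group_fio (contacts : List (List String)) (out : List (List String)) : Prop :=
  out = group_fio_alt contacts
instance (contacts : List (List String)) (out : List (List String)) :
    Decidable (Spec_group_fio contacts out) := by unfold Spec_group_fio; infer_instance

-- ===== CLAIM (what is proved, stated in full; the proofs are below) =====
def Claim_equal_group_fio : Prop := ∀ (contacts : List (List String)),
  Dom_group_fio contacts → Pre_group_fio contacts →
  Spec_group_fio contacts (group_fio contacts)

-- ===== LEMMAS AND PROOFS =====

lemma set_contains_add (s : PySem.Set (String × String)) (x k : String × String) :
    (s.add x).contains k = (k == x || s.contains k) := by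
  simp only [PySem.Set.add, PySem.Set.contains, List.contains_eq_mem]
  by_cases hx : x ∈ s <;> by_cases hk : k = x <;> simp [hx, hk]

-- loop invariant: B's accumulated list is res₀ ++ the rows A's dict holds so far
lemma fio_loop_eq (tail : List (List String))
    (d : PySem.Dict (String × String) (List String)) (s : PySem.Set (String × String))
    (res : List (List String))
    (hks : ∀ k, s.contains k = d.contains k) :
    (tail.foldl fioStepB (res ++ d.items.map fioRow, s)).1
      = res ++ ((tail.foldl fioStepA d).items).map fioRow := by
  induction tail generalizing d s res with
  | nil => simp
  | cons item rest ih =>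
    simp only [List.foldl_cons]
    match item with
    | [] => simpa [fioStepA, fioStepB] using ih d s res hks
    | [a] => simpa [fioStepA, fioStepB] using ih d s res hks
    | a :: b :: rs =>
      by_cases hc : d.contains (a, b) = true
      · simp only [fioStepA, fioStepB, hks, hc, if_true]
        exact ih d s res hks
      · have hc' : d.contains (a, b) = false := by simpa using hc
        simp only [fioStepA, fioStepB, hks, hc', if_false, Bool.false_eq_true]
        have hitems : (d.insert (a, b) rs).items = d.items ++ [((a, b), rs)] :=
          PySem.Dict.items_insert_of_not_contains d rs hc'
        have := ih (d.insert (a, b) rs) (s.add (a, b)) res (by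
          intro k
          rw [set_contains_add, PySem.Dict.contains_insert, hks])
        simpa [hitems, fioRow] using this

-- ===== VERDICT (by name: the statement is the Claim_ definition above) =====
theorem group_fio_spec : Claim_equal_group_fio := by
  intro contacts _hdom hpre
  obtain ⟨hne, -⟩ := hpre
  obtain ⟨h, tail, rfl⟩ : ∃ h tail, contacts = h :: tail := by
    cases contacts with
    | nil => exact absurd rfl hne
    | cons h t => exact ⟨h, t, rfl⟩
  show group_fio (h :: tail) = group_fio_alt (h :: tail)
  have hslice : PySem.List.slice (h :: tail) (some 1) none = tail := by
    simpa using PySem.List.slice_from_one (h :: tail)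
  have hget : PySem.List.pyGet? (h :: tail) 0 = some h := by
    simp [PySem.List.pyGet?, PySem.List.pyIdx?]
  have := fio_loop_eq tail PySem.Dict.empty PySem.Set.empty [h]
    (by intro k; simp [PySem.Set.contains, PySem.Set.empty])
  simp only [PySem.Dict.empty, List.map_nil, List.append_nil] at this
  simp only [group_fio, group_fio_alt, hslice, hget]
  exact this.symm
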